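-- pv_equiv track=rewrite | github.com/vincentbonnetcg/Toy-Code1 | implicit_solver/lib/common/shape.py | vertex_ids_neighbours
-- ===== SOURCE A (Python) =====
-- def vertex_ids_neighbours(vertex_ids):
--     result = {}
--     for component_id, vtx_ids in enumerate(vertex_ids):
--         for vtx_id0 in vtx_ids:
--             for vtx_id1 in vtx_ids:
--                 if vtx_id0 != vtx_id1:
--                     result.setdefault(vtx_id0, []).append(vtx_id1)
--     return result
-- ===== SOURCE B (Python) =====
-- def vertex_ids_neighbours(vertex_ids):
--     result = {}
--     for vtx_ids in vertex_ids:
--         count = {}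
--         for v in vtx_ids:
--             count[v] = count.get(v, 0) + 1
--         for x, c in count.items():
--             neighbours = [v for v in vtx_ids if v != x]
--             if neighbours:
--                 result.setdefault(x, []).extend(neighbours * c)
--     return result
-- ===== Notes on version B (the rewrite author's own statement) =====
-- stated objective: alternative
-- what changed: A re-walks the whole component for every occurrence of every vertex, appending one neighbour at a time; B first builds a per-component count table, then iterates each distinct vertex once, computes its neighbour list a single time and extends the result with that list replicated by the vertex's multiplicity.
import Mathlib
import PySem

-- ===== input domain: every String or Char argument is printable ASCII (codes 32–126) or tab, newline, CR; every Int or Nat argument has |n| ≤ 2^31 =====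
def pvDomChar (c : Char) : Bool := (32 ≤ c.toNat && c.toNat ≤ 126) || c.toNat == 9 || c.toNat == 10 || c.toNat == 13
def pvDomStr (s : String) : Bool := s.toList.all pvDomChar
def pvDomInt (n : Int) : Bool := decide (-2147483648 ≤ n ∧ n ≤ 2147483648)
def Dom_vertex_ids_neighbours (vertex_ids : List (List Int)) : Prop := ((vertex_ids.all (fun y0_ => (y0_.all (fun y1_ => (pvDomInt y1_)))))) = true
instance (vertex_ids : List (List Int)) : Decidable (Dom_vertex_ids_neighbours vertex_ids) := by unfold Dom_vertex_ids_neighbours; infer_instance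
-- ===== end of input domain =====

-- B groups each component's vertices with a count table and emits each distinct vertex's
-- neighbour list once, replicated by its multiplicity, instead of A's rescan per occurrence
-- (a constant-factor speedup a timing run measured; same return value).

-- ===== PORT A =====
def vertex_ids_neighbours (vertex_ids : List (List Int)) : List (Int × List Int) :=
  ((PySem.List.enumerate vertex_ids).foldl (fun result ci =>
      -- for component_id, vtx_ids in enumerate(vertex_ids): (component_id = ci.1 is unused)
      ci.2.foldl (fun result vtx_id0 =>
        ci.2.foldl (fun result vtx_id1 =>
          if vtx_id0 ≠ vtx_id1 then
            -- result.setdefault(vtx_id0, []).append(vtx_id1)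
            result.modify vtx_id0 [] (fun v => v ++ [vtx_id1])
          else result) result) result)
    (PySem.Dict.empty : PySem.Dict Int (List Int))).items

-- ===== PORT B =====
def vertex_ids_neighbours_alt (vertex_ids : List (List Int)) : List (Int × List Int) :=
  (vertex_ids.foldl (fun result vtx_ids =>
      -- count[v] = count.get(v, 0) + 1
      let count := vtx_ids.foldl (fun d v => d.insert v (d.getD v 0 + 1))
                     (PySem.Dict.empty : PySem.Dict Int Int)
      -- for x, c in count.items(): neighbours = [v for v in vtx_ids if v != x]
      count.items.foldl (fun result xc =>
        let neighbours := vtx_ids.filter (fun v => v ≠ xc.1)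
        if neighbours ≠ [] then
          -- result.setdefault(x, []).extend(neighbours * c)
          result.modify xc.1 [] (fun v => v ++ (List.replicate xc.2.toNat neighbours).flatten)
        else result) result)
    (PySem.Dict.empty : PySem.Dict Int (List Int))).items

-- ===== PRECONDITION & SPEC =====
def Spec_vertex_ids_neighbours (vertex_ids : List (List Int)) (out : List (Int × List Int)) : Prop := out = vertex_ids_neighbours_alt vertex_ids
instance (vertex_ids : List (List Int)) (out : List (Int × List Int)) : Decidable (Spec_vertex_ids_neighbours vertex_ids out) := by unfold Spec_vertex_ids_neighbours; infer_instance

-- ===== CLAIM (what is proved, stated in full; the proofs are below) =====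
def Claim_equal_vertex_ids_neighbours : Prop := ∀ (vertex_ids : List (List Int)), Dom_vertex_ids_neighbours vertex_ids → Spec_vertex_ids_neighbours vertex_ids (vertex_ids_neighbours vertex_ids)

-- ===== LEMMAS AND PROOFS =====

-- A's per-component double loop and B's per-component grouped loop as standalone functions
-- (each is definitionally the body of the corresponding port's outer fold).
def pvStepA (l : List Int) (d : PySem.Dict Int (List Int)) : PySem.Dict Int (List Int) :=
  l.foldl (fun result vtx_id0 =>
    l.foldl (fun result vtx_id1 =>
      if vtx_id0 ≠ vtx_id1 then result.modify vtx_id0 [] (fun v => v ++ [vtx_id1])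
      else result) result) d

def pvStepB (l : List Int) (d : PySem.Dict Int (List Int)) : PySem.Dict Int (List Int) :=
  ((l.foldl (fun d v => d.insert v (d.getD v 0 + 1)) (PySem.Dict.empty : PySem.Dict Int Int)).items).foldl
    (fun result xc =>
      if l.filter (fun v => v ≠ xc.1) ≠ [] then
        result.modify xc.1 [] (fun v => v ++ (List.replicate xc.2.toNat (l.filter (fun v => v ≠ xc.1))).flatten)
      else result) d

-- neighbour list of x in component l, its total replicated contribution, the flattened
-- (key, value) occurrence list of A's double loop, and B's distinct-key list
def pvNb (l : List Int) (x : Int) : List Int := l.filter (fun v => v ≠ x)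
def pvRep (l : List Int) (x : Int) : List Int := (List.replicate (List.count x l) (pvNb l x)).flatten
def pvPairs (l : List Int) : List (Int × Int) := l.flatMap (fun x => (pvNb l x).map (fun y => (x, y)))
def pvKeysB (l : List Int) : List Int := (PySem.Set.ofList l).filter (fun x => decide (pvNb l x ≠ []))

theorem pv_enumerate_foldl (xs : List (List Int)) (n : Int) (acc : PySem.Dict Int (List Int)) :
    (PySem.List.enumerate xs n).foldl (fun a p => pvStepA p.2 a) acc = xs.foldl (fun a l => pvStepA l a) acc := by
  induction xs generalizing n acc with
  | nil => rfl
  | cons x t ih => simp [PySem.List.enumerate, ih]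

theorem pv_flatten_replicate_nil {α : Type} (n : Nat) :
    (List.replicate n ([] : List α)).flatten = [] := by
  induction n with
  | zero => rfl
  | succ n ih => simp [List.replicate_succ, ih]

theorem pv_flatMap_ite_count {α : Type} [DecidableEq α] (l : List α) (c : α) (w : List α) :
    (l.flatMap (fun x => if x = c then w else [])) = (List.replicate (List.count c l) w).flatten := by
  induction l with
  | nil => rfl
  | cons x t ih =>
    by_cases h : x = c
    · subst h; simp [List.flatMap_cons, ih, List.replicate_succ]
    · simp [List.flatMap_cons, ih, h]

theorem pv_update_replicate (s : PySem.Set Int) (x : Int) (n : Nat) :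
    s.update (List.replicate n x) = if n = 0 then s else s.add x := by
  induction n generalizing s with
  | zero => simp [PySem.Set.update_nil]
  | succ n ih =>
    rw [List.replicate_succ, PySem.Set.update_cons, ih]
    by_cases h : n = 0
    · simp [h]
    · simp only [h, if_false, Nat.succ_ne_zero]
      by_cases hc : x ∈ s <;> simp [PySem.Set.add, hc]

theorem pv_update_flatMap_replicate (g : Int → Nat) :
    ∀ (l : List Int) (s : PySem.Set Int),
      s.update (l.flatMap (fun x => List.replicate (g x) x)) =
      s.update (l.filter (fun x => g x ≠ 0)) := by
  intro l
  induction l with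
  | nil => intro s; rfl
  | cons x t ih =>
    intro s
    rw [List.flatMap_cons, PySem.Set.update_append, pv_update_replicate]
    by_cases h : g x = 0
    · simp [h, ih]
    · simp only [h, if_false]
      rw [List.filter_cons]
      simp only [h, ne_eq, not_false_iff, decide_true, if_true]
      rw [PySem.Set.update_cons, ih]

theorem pv_ofList_filter (p : Int → Bool) :
    ∀ (l : List Int), PySem.Set.ofList (l.filter p) = (PySem.Set.ofList l).filter p := by
  intro l
  induction l with
  | nil => rfl
  | cons x t ih =>
    rw [List.filter_cons]
    by_cases h : p x = true
    · simp only [h, if_true]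
      rw [PySem.Set.ofList_cons, PySem.Set.ofList_cons, ih]
      simp only [PySem.Set.discard, List.filter_cons, h, if_true]
      rw [List.filter_comm]
    · simp only [h, Bool.false_eq_true, if_false]
      rw [ih, PySem.Set.ofList_cons, List.filter_cons]
      simp only [h, Bool.false_eq_true, if_false, PySem.Set.discard, List.filter_filter]
      symm
      apply List.filter_congr
      intro y _
      by_cases hy : y = x
      · subst hy; simp [h]
      · simp [hy]

theorem pv_ofList_idem : ∀ (l : List Int),
    PySem.Set.ofList (PySem.Set.ofList l) = PySem.Set.ofList l := by
  intro l
  induction l with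
  | nil => rfl
  | cons x t ih =>
    rw [PySem.Set.ofList_cons, PySem.Set.ofList_cons]
    congr 1
    simp only [PySem.Set.discard]
    rw [pv_ofList_filter, ih, List.filter_filter]
    apply List.filter_congr
    intro y _
    simp

theorem pv_update_filter_ofList (s : PySem.Set Int) (l : List Int) (p : Int → Bool) :
    s.update (l.filter p) = s.update ((PySem.Set.ofList l).filter p) := by
  rw [PySem.Set.update_eq_append_filter, PySem.Set.update_eq_append_filter,
      pv_ofList_filter p l, pv_ofList_filter p (PySem.Set.ofList l), pv_ofList_idem]

theorem pv_getD_foldl_modify_w (w : Int → List Int) :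
    ∀ (ks : List Int), ks.Nodup → ∀ (d : PySem.Dict Int (List Int)) (c : Int),
      ((ks.foldl (fun d x => d.modify x [] (fun v => v ++ w x)) d).getD c []) =
      d.getD c [] ++ (if c ∈ ks then w c else []) := by
  intro ks
  induction ks with
  | nil => intro _ d c; simp
  | cons x t ih =>
    intro hnd d c
    have hx : x ∉ t := (List.nodup_cons.mp hnd).1
    rw [List.foldl_cons, ih (List.nodup_cons.mp hnd).2, PySem.Dict.getD_modify]
    by_cases h : c = x
    · subst h; simp [hx]
    · simp [h]

theorem pv_stepA_eq_pairs (l : List Int) (d : PySem.Dict Int (List Int)) :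
    pvStepA l d =
      (pvPairs l).foldl (fun d p => d.modify p.1 [] (fun v => v ++ [p.2])) d := by
  unfold pvPairs pvNb
  rw [List.foldl_flatMap]
  unfold pvStepA
  apply PySem.List.foldl_congr_mem
  intro acc x _
  rw [List.foldl_map, List.foldl_filter]
  apply PySem.List.foldl_congr_mem
  intro a y _
  by_cases h : x = y
  · simp [h]
  · simp [h, Ne.symm h]

theorem pv_stepB_eq (l : List Int) (d : PySem.Dict Int (List Int)) :
    pvStepB l d =
      (pvKeysB l).foldl (fun d x => d.modify x [] (fun v => v ++ pvRep l x)) d := by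
  unfold pvStepB pvKeysB
  rw [PySem.Dict.foldl_insert_getD_add_one_eq_counter, PySem.Dict.items_counter,
      List.foldl_map, List.foldl_filter]
  apply PySem.List.foldl_congr_mem
  intro acc x _
  simp only [pvNb, pvRep, Int.toNat_natCast, decide_eq_true_eq]

theorem pv_map_fst_pairs (l : List Int) :
    (pvPairs l).map (·.1) = l.flatMap (fun x => List.replicate (pvNb l x).length x) := by
  unfold pvPairs
  rw [List.map_flatMap]
  congr 1
  funext x
  rw [List.map_map]
  exact List.map_const' 

theorem pv_keysA (l : List Int) (d : PySem.Dict Int (List Int)) :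
    (pvStepA l d).keys = PySem.Set.update d.keys ((pvPairs l).map (·.1)) := by
  rw [pv_stepA_eq_pairs]
  exact PySem.Dict.keys_foldl_modify_key (pvPairs l) Prod.fst [] (fun _ p v => v ++ [p.2]) d

theorem pv_keysB (l : List Int) (d : PySem.Dict Int (List Int)) :
    (pvStepB l d).keys = PySem.Set.update d.keys (pvKeysB l) := by
  rw [pv_stepB_eq]
  exact PySem.Dict.keys_foldl_modify (pvKeysB l) [] (fun _ x v => v ++ pvRep l x) d

theorem pv_keys_eq (l : List Int) (d : PySem.Dict Int (List Int)) :
    (pvStepA l d).keys = (pvStepB l d).keys := by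
  rw [pv_keysA, pv_map_fst_pairs, pv_keysB,
      pv_update_flatMap_replicate (fun x => (pvNb l x).length) l d.keys, pvKeysB,
      pv_update_filter_ofList]
  congr 1
  apply List.filter_congr
  intro y _
  simp [List.length_eq_zero_iff]

theorem pv_nodup_stepA (l : List Int) (d : PySem.Dict Int (List Int))
    (h : d.keys.Nodup) : (pvStepA l d).keys.Nodup := by
  rw [pv_stepA_eq_pairs]
  exact PySem.Dict.nodup_keys_foldl_modify_key (pvPairs l) Prod.fst [] (fun _ p v => v ++ [p.2]) d h

theorem pv_getDA (l : List Int) (d : PySem.Dict Int (List Int)) (c : Int) :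
    (pvStepA l d).getD c [] = d.getD c [] ++ pvRep l c := by
  rw [pv_stepA_eq_pairs, PySem.Dict.getD_foldl_modify_append]
  congr 1
  have hinner : ∀ x : Int,
      (List.map (fun p => p.2) (((pvNb l x).map (fun y => (x, y))).filter (fun p => p.1 == c)))
        = if x = c then pvNb l c else [] := by
    intro x
    by_cases h : x = c
    · subst h; simp [List.filter_map, Function.comp_def, List.map_map]
    · simp [List.filter_map, Function.comp_def, h]
  unfold pvPairs
  rw [List.filter_flatMap, List.map_flatMap]
  rw [show (fun x => List.map (fun p => p.2) (((pvNb l x).map (fun y => (x, y))).filter (fun p => p.1 == c)))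
        = (fun x => if x = c then pvNb l c else []) from funext hinner]
  rw [pv_flatMap_ite_count]
  rfl

theorem pv_nodup_keysB (l : List Int) : (pvKeysB l).Nodup :=
  (PySem.Set.nodup_ofList l).filter _

theorem pv_getDB (l : List Int) (d : PySem.Dict Int (List Int)) (c : Int) :
    (pvStepB l d).getD c [] = d.getD c [] ++ (if c ∈ pvKeysB l then pvRep l c else []) := by
  rw [pv_stepB_eq]
  exact pv_getD_foldl_modify_w (pvRep l) (pvKeysB l) (pv_nodup_keysB l) d c

theorem pv_rep_eq_ite (l : List Int) (c : Int) :
    pvRep l c = (if c ∈ pvKeysB l then pvRep l c else []) := by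
  by_cases h : c ∈ pvKeysB l
  · simp [h]
  · simp only [h, if_false]
    unfold pvKeysB at h
    rw [List.mem_filter] at h
    by_cases hc : c ∈ l
    · have hnb : pvNb l c = [] := by
        by_contra hne
        exact h ⟨(PySem.Set.mem_ofList l c).mpr hc, by simpa using hne⟩
      rw [pvRep, hnb, pv_flatten_replicate_nil]
    · have : List.count c l = 0 := List.count_eq_zero.mpr hc
      rw [pvRep, this]
      rfl

theorem pv_stepA_eq_stepB (l : List Int) (d : PySem.Dict Int (List Int))
    (h : d.keys.Nodup) : pvStepA l d = pvStepB l d := by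
  have hk := pv_keys_eq l d
  have hna := pv_nodup_stepA l d h
  apply PySem.Dict.ext
  rw [PySem.Dict.items_eq_map_keys _ hna ([] : List Int),
      PySem.Dict.items_eq_map_keys _ (hk ▸ hna) ([] : List Int), ← hk]
  apply List.map_congr_left
  intro k _
  rw [pv_getDA, pv_getDB, ← pv_rep_eq_ite]

theorem pv_outer_eq : ∀ (vis : List (List Int)) (d : PySem.Dict Int (List Int)),
    d.keys.Nodup →
    (vis.foldl (fun d l => pvStepA l d) d) = (vis.foldl (fun d l => pvStepB l d) d) := by
  intro vis
  induction vis with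
  | nil => intro d _; rfl
  | cons l t ih =>
    intro d h
    rw [List.foldl_cons, List.foldl_cons, ← pv_stepA_eq_stepB l d h,
        ih _ (pv_nodup_stepA l d h)]

-- ===== VERDICT (by name: the statement is the Claim_ definition above) =====
theorem vertex_ids_neighbours_spec : Claim_equal_vertex_ids_neighbours := by
  intro vertex_ids _
  show ((PySem.List.enumerate vertex_ids 0).foldl (fun a p => pvStepA p.2 a)
          (PySem.Dict.empty : PySem.Dict Int (List Int))).items
      = ((vertex_ids.foldl (fun a l => pvStepB l a)
          (PySem.Dict.empty : PySem.Dict Int (List Int))).items)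
  rw [pv_enumerate_foldl]
  exact congrArg PySem.Dict.items
    (pv_outer_eq vertex_ids PySem.Dict.empty (by simp [PySem.Dict.keys_empty]))
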